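-- pv_equiv track=rewrite | github.com/BurakKontas/dynamic-function-executor | logs.py | apply_colors
-- ===== SOURCE A (Python) =====
-- severity_colors = {
--     'INFO': 'rgba(0, 0, 255, 1)',  # Bright blue with 80% opacity
--     'WARNING': 'rgba(255, 255, 0, 1)',  # Bright yellow with 80% opacity
--     'ERROR': 'rgba(255, 0, 0, 1)',  # Strong red with 90% opacity
--     'DEBUG': 'rgba(0, 255, 0, 1)',  # Bright green with 80% opacity
--     'RESET': 'rgba(0, 0, 0, 1)',  # Black (fully opaque)
--     # Intense red with 100% opacity for critical
--     'CRITICAL': 'rgba(255, 120, 120, 1)',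
--     'DEV': 'rgba(255, 0, 255, 1)'
-- }
--
-- def apply_colors(log_content):
--     lines = log_content.splitlines()
--     colored_lines = []
--     current_severity = None  # Keep track of the last severity
--
--     for line in lines:
--         # Determine the severity of the line
--         if '[INFO]' in line:
--             color = severity_colors['INFO']
--             current_severity = 'INFO'
--         elif '[WARNING]' in line:
--             color = severity_colors['WARNING']
--             current_severity = 'WARNING'
--         elif '[ERROR]' in line:
--             color = severity_colors['ERROR']
--             current_severity = 'ERROR'
--         elif '[DEBUG]' in line:
--             color = severity_colors['DEBUG']
--             current_severity = 'DEBUG'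
--         elif '[CRITICAL]' in line:
--             color = severity_colors['CRITICAL']
--             current_severity = 'CRITICAL'
--         elif '[DEV]' in line:
--             color = severity_colors['DEV']
--             current_severity = 'DEV'
--         else:
--             # If no severity is found, use the previous line's severity
--             if current_severity:
--                 color = severity_colors[current_severity]
--             else:
--                 color = severity_colors['RESET']
--
--         # Add the line to the colored output
--         colored_line = f"<span style='color:{color}'>{line}</span>"
--         colored_lines.append(colored_line)
--
--     return "<br>".join(colored_lines)
-- ===== SOURCE B (Python) =====
-- severity_colors = {
--     'INFO': 'rgba(0, 0, 255, 1)',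
--     'WARNING': 'rgba(255, 255, 0, 1)',
--     'ERROR': 'rgba(255, 0, 0, 1)',
--     'DEBUG': 'rgba(0, 255, 0, 1)',
--     'RESET': 'rgba(0, 0, 0, 1)',
--     'CRITICAL': 'rgba(255, 120, 120, 1)',
--     'DEV': 'rgba(255, 0, 255, 1)'
-- }
--
--
-- def _detect(line):
--     # first tag contained in the line, in A's priority order
--     for sev in ('INFO', 'WARNING', 'ERROR', 'DEBUG', 'CRITICAL', 'DEV'):
--         if f'[{sev}]' in line:
--             return sev
--     return None
--
--
-- def apply_colors(log_content):
--     # Chop the line list into maximal segments at tagged lines: each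
--     # iteration renders one whole segment (untagged run + its tagged
--     # delimiter) with a single color lookup per run, then continues on
--     # the remainder with the delimiter's severity.
--     out = []
--     sev = 'RESET'
--     rest = log_content.splitlines()
--     while True:
--         j = next((k for k, l in enumerate(rest) if _detect(l) is not None), None)
--         color = severity_colors[sev]
--         if j is None:
--             out += [f"<span style='color:{color}'>{l}</span>" for l in rest]
--             return "<br>".join(out)
--         out += [f"<span style='color:{color}'>{l}</span>" for l in rest[:j]]
--         sev = _detect(rest[j])
--         out.append(f"<span style='color:{severity_colors[sev]}'>{rest[j]}</span>")
--         rest = rest[j + 1:]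
-- ===== Notes on version B (the rewrite author's own statement) =====
-- stated objective: alternative
-- what changed: A walks line by line carrying the last severity and choosing a color per line; B instead repeatedly chops the whole line list at the next tagged line, rendering each maximal untagged run plus its tagged delimiter as one segment with one color lookup per run, and recurses on the remainder.
import Mathlib
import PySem

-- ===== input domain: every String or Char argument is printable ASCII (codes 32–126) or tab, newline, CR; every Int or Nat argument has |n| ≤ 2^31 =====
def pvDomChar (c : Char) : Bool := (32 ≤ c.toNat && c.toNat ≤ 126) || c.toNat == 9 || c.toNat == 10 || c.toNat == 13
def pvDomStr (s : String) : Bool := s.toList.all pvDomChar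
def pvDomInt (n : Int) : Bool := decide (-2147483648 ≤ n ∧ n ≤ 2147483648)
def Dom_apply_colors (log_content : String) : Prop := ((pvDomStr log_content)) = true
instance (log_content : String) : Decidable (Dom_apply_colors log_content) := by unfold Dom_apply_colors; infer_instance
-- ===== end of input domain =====

-- B replaces A's per-line carry-forward loop by repeated chopping of the line list at the next tagged line, rendering whole segments; alternative decomposition, same cost.


-- module-level constant shared by both versions
def severity_colors : PySem.Dict String String := PySem.Dict.mk
  [("INFO", "rgba(0, 0, 255, 1)"),
   ("WARNING", "rgba(255, 255, 0, 1)"),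
   ("ERROR", "rgba(255, 0, 0, 1)"),
   ("DEBUG", "rgba(0, 255, 0, 1)"),
   ("RESET", "rgba(0, 0, 0, 1)"),
   ("CRITICAL", "rgba(255, 120, 120, 1)"),
   ("DEV", "rgba(255, 0, 255, 1)")]

-- f"<span style='color:{color}'>{line}</span>"  (the keys used always exist, so getD's default is never read)
def mkSpan (color line : String) : String :=
  PySem.Str.join "" ["<span style='color:", color, "'>", line, "</span>"]

-- ===== PORT A =====
-- the body of A's for-loop, carrying (colored_lines, current_severity)
def stepA (st : List String × Option String) (line : String) : List String × Option String :=
  let (colored_lines, current_severity) := st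
  let p : String × Option String :=
    if PySem.Str.isIn "[INFO]" line then (severity_colors.getD "INFO" "", some "INFO")
    else if PySem.Str.isIn "[WARNING]" line then (severity_colors.getD "WARNING" "", some "WARNING")
    else if PySem.Str.isIn "[ERROR]" line then (severity_colors.getD "ERROR" "", some "ERROR")
    else if PySem.Str.isIn "[DEBUG]" line then (severity_colors.getD "DEBUG" "", some "DEBUG")
    else if PySem.Str.isIn "[CRITICAL]" line then (severity_colors.getD "CRITICAL" "", some "CRITICAL")
    else if PySem.Str.isIn "[DEV]" line then (severity_colors.getD "DEV" "", some "DEV")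
    else match current_severity with
      | some s => (severity_colors.getD s "", some s)
      | none => (severity_colors.getD "RESET" "", none)
  (colored_lines ++ [mkSpan p.1 line], p.2)

def apply_colors (log_content : String) : String :=
  let lines := PySem.Str.splitlines log_content
  let st := lines.foldl stepA ([], none)
  PySem.Str.join "<br>" st.1

-- ===== PORT B =====
-- _detect: first tag contained in the line, in A's priority order
def detect (line : String) : Option String :=
  ["INFO", "WARNING", "ERROR", "DEBUG", "CRITICAL", "DEV"].find?
    (fun s => PySem.Str.isIn ("[" ++ s ++ "]") line)

-- B's while loop: chop `rest` at the next tagged line, render the whole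
-- untagged run plus its delimiter, continue on the remainder
def chop (rest : List String) (sev : String) : List String :=
  match h : rest.findIdx? (fun l => (detect l).isSome) with
  | none => rest.map (fun l => mkSpan (severity_colors.getD sev "") l)
  | some j =>
      let s := (detect (rest.getD j "")).getD ""
      (rest.take j).map (fun l => mkSpan (severity_colors.getD sev "") l)
        ++ [mkSpan (severity_colors.getD s "") (rest.getD j "")]
        ++ chop (rest.drop (j + 1)) s
termination_by rest.length
decreasing_by
  cases rest with
  | nil => simp at h
  | cons a t => simp [List.length_drop]

def apply_colors_alt (log_content : String) : String :=
  PySem.Str.join "<br>" (chop (PySem.Str.splitlines log_content) "RESET")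

-- ===== PRECONDITION & SPEC =====
def Spec_apply_colors (log_content : String) (out : String) : Prop := out = apply_colors_alt log_content
instance (log_content : String) (out : String) : Decidable (Spec_apply_colors log_content out) := by unfold Spec_apply_colors; infer_instance

-- ===== CLAIM =====
def Claim_equal_apply_colors : Prop := ∀ (log_content : String), Dom_apply_colors log_content → Spec_apply_colors log_content (apply_colors log_content)

-- ===== LEMMAS AND PROOFS =====

-- the severity A's state represents: none is "RESET"
def effSev : Option String → String
  | none => "RESET"
  | some s => s

theorem stepA_tagged (acc : List String) (cur : Option String) (line s : String)
    (h : detect line = some s) :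
    stepA (acc, cur) line = (acc ++ [mkSpan (severity_colors.getD s "") line], some s) := by
  by_cases h1 : PySem.Str.isIn "[INFO]" line = true <;>
  by_cases h2 : PySem.Str.isIn "[WARNING]" line = true <;>
  by_cases h3 : PySem.Str.isIn "[ERROR]" line = true <;>
  by_cases h4 : PySem.Str.isIn "[DEBUG]" line = true <;>
  by_cases h5 : PySem.Str.isIn "[CRITICAL]" line = true <;>
  by_cases h6 : PySem.Str.isIn "[DEV]" line = true <;>
  simp_all [detect, List.find?, stepA]

theorem stepA_untagged (acc : List String) (cur : Option String) (line : String)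
    (h : detect line = none) :
    stepA (acc, cur) line = (acc ++ [mkSpan (severity_colors.getD (effSev cur) "") line], cur) := by
  simp only [detect, List.find?] at h
  by_cases h1 : PySem.Str.isIn "[INFO]" line = true <;>
  by_cases h2 : PySem.Str.isIn "[WARNING]" line = true <;>
  by_cases h3 : PySem.Str.isIn "[ERROR]" line = true <;>
  by_cases h4 : PySem.Str.isIn "[DEBUG]" line = true <;>
  by_cases h5 : PySem.Str.isIn "[CRITICAL]" line = true <;>
  by_cases h6 : PySem.Str.isIn "[DEV]" line = true <;>
  simp_all [stepA] <;> cases cur <;> simp [effSev]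

theorem chop_cons_tagged (l : String) (rest : List String) (sev s : String)
    (h : detect l = some s) :
    chop (l :: rest) sev = mkSpan (severity_colors.getD s "") l :: chop rest s := by
  have hf : (l :: rest).findIdx? (fun x => (detect x).isSome) = some 0 := by
    simp [List.findIdx?_cons, h]
  rw [chop]
  split
  · simp_all
  · next j heq =>
      rw [hf] at heq
      cases heq
      simp [h]

theorem chop_cons_untagged (l : String) (rest : List String) (sev : String)
    (h : detect l = none) :
    chop (l :: rest) sev = mkSpan (severity_colors.getD sev "") l :: chop rest sev := by
  have hf : (l :: rest).findIdx? (fun x => (detect x).isSome)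
      = (rest.findIdx? (fun x => (detect x).isSome)).map (· + 1) := by
    simp [List.findIdx?_cons, h]
  rw [chop, chop]
  split
  · next heq =>
      rw [hf] at heq
      cases hr : rest.findIdx? (fun x => (detect x).isSome) with
      | none => simp [hr]
      | some j => rw [hr] at heq; simp at heq
  · next j heq =>
      rw [hf] at heq
      cases hr : rest.findIdx? (fun x => (detect x).isSome) with
      | none => rw [hr] at heq; simp at heq
      | some j' =>
          rw [hr] at heq
          simp at heq
          subst heq
          simp [hr]

theorem foldA_eq_chop (lines : List String) (acc : List String) (cur : Option String) :
    (lines.foldl stepA (acc, cur)).1 = acc ++ chop lines (effSev cur) := by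
  induction lines generalizing acc cur with
  | nil => rw [chop]; simp
  | cons l rest ih =>
    cases hd : detect l with
    | some s =>
      rw [List.foldl_cons, stepA_tagged acc cur l s hd, ih, chop_cons_tagged l rest _ s hd]
      simp [effSev]
    | none =>
      rw [List.foldl_cons, stepA_untagged acc cur l hd, ih, chop_cons_untagged l rest _ hd]
      simp

-- ===== VERDICT =====
theorem apply_colors_spec : Claim_equal_apply_colors := by
  intro log_content _
  unfold Spec_apply_colors apply_colors apply_colors_alt
  simp [foldA_eq_chop, effSev]
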